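-- pv_equiv track=rewrite | github.com/MattiaBaldinetti/PythonExercises | 62/program.py | es62
-- ===== SOURCE A (Python) =====
-- def es62(matrice):
--     # Massimo valore
--     imax = jmax = 0
--     for j in range(len(matrice[0])):
--         for i in range(len(matrice)):
--             if matrice[i][j] >= matrice[imax][jmax]:
--                 imax = i
--                 jmax = j
--
--     # Minimo valore
--     imin = jmin = 0
--     for j in range(len(matrice[0])):
--         for i in range(len(matrice)):
--             if matrice[i][j] < matrice[imin][jmin]:
--                 imin = i
--                 jmin = j
--
--     # # Crea una copia della matrice originale
--     m1 = [[matrice[i][j] for j in range(len(matrice[0]))] for i in range(len(matrice))]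
--
--     "Scambio i1 con i2 e j1 con j2"
--     for j in range(len(matrice[0])):
--         m1[imin][j] = matrice[imax][j]
--         m1[imax][j] = matrice[imin][j]
--     for i in range(len(matrice)):
--         m1[i][jmin], m1[i][jmax] = m1[i][jmax], m1[i][jmin]
--
--     return m1
-- ===== SOURCE B (Python) =====
-- def _transpose(rows):
--     return [[row[j] for row in rows] for j in range(len(rows[0]))]
--
-- def es62(matrice):
--     n, m = len(matrice), len(matrice[0])
--     # decorate every cell as (value, j, i); tuple order reproduces A's tie-breaking:
--     # max -> largest (value, j, i) = last column-major maximum; min -> first column-major minimum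
--     cells = [(matrice[i][j], j, i) for j in range(m) for i in range(n)]
--     _, jmax, imax = max(cells)
--     _, jmin, imin = min(cells)
--     rows = [row[:m] for row in matrice]
--     rows[imin], rows[imax] = rows[imax], rows[imin]
--     cols = _transpose(rows)
--     cols[jmin], cols[jmax] = cols[jmax], cols[jmin]
--     return _transpose(cols)
-- ===== Notes on version B (the rewrite author's own statement) =====
-- stated objective: alternative
-- what changed: B replaces A's two running-argmax scans by decorating each cell as a (value, j, i) triple and taking the plain max/min of the triple list (tuple order reproduces A's tie-breaking), and replaces A's copy-then-in-place row swap-then-in-place column swap by swapping two whole rows, transposing, swapping two rows of the transpose, and transposing back.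
import Mathlib
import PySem

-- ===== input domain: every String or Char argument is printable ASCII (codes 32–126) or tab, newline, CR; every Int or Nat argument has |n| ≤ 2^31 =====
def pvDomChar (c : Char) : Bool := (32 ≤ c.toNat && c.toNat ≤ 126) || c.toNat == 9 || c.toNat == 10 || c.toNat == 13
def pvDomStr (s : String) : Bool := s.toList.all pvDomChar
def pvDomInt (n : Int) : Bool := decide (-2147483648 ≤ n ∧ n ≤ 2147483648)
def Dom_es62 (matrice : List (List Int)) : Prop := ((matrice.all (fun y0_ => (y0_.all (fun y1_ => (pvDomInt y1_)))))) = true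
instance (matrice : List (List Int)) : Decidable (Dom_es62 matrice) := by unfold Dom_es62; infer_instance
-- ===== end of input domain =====

-- B finds the extremal cells by taking max/min of a decorated (value, j, i) triple list (tuple
-- order gives A's tie-breaking) and performs the column swap by transpose / row swap / transpose,
-- instead of A's running-argmax scans and in-place cell-by-cell swaps (alternative decomposition).

-- matrice[i][j] (total form; every use below is in range under Pre_es62)
def pvAt (matrice : List (List Int)) (i j : Int) : Int :=
  PySem.List.pyGetD (PySem.List.pyGetD matrice i []) j 0

-- ===== PORT A =====
-- nested column-major scans: `for j in range(len(matrice[0])): for i in range(len(matrice)):`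
def esAMax (matrice : List (List Int)) : Int × Int :=
  (PySem.List.pyRange 0 ((PySem.List.pyGetD matrice 0 []).length : Int) 1).foldl
    (fun (s : Int × Int) j =>
      (PySem.List.pyRange 0 (matrice.length : Int) 1).foldl
        (fun (s : Int × Int) i =>
          if pvAt matrice s.1 s.2 ≤ pvAt matrice i j then (i, j) else s) s)
    (0, 0)

def esAMin (matrice : List (List Int)) : Int × Int :=
  (PySem.List.pyRange 0 ((PySem.List.pyGetD matrice 0 []).length : Int) 1).foldl
    (fun (s : Int × Int) j =>
      (PySem.List.pyRange 0 (matrice.length : Int) 1).foldl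
        (fun (s : Int × Int) i =>
          if pvAt matrice i j < pvAt matrice s.1 s.2 then (i, j) else s) s)
    (0, 0)

-- m1 = [[matrice[i][j] for j in range(len(matrice[0]))] for i in range(len(matrice))]
def esACopy (matrice : List (List Int)) : List (List Int) :=
  (PySem.List.pyRange 0 (matrice.length : Int) 1).map (fun i =>
    (PySem.List.pyRange 0 ((PySem.List.pyGetD matrice 0 []).length : Int) 1).map (fun j =>
      pvAt matrice i j))

-- loop body: m1[imin][j] = matrice[imax][j]; m1[imax][j] = matrice[imin][j]
def esARowStep (matrice : List (List Int)) (imin imax : Int) (m1 : List (List Int)) (j : Int) : List (List Int) :=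
  PySem.List.pySetD
    (PySem.List.pySetD m1 imin
      (PySem.List.pySetD (PySem.List.pyGetD m1 imin []) j (pvAt matrice imax j)))
    imax
    (PySem.List.pySetD
      (PySem.List.pyGetD
        (PySem.List.pySetD m1 imin
          (PySem.List.pySetD (PySem.List.pyGetD m1 imin []) j (pvAt matrice imax j)))
        imax [])
      j (pvAt matrice imin j))

def esARowSwap (matrice : List (List Int)) (imin imax : Int) (m1 : List (List Int)) : List (List Int) :=
  (PySem.List.pyRange 0 ((PySem.List.pyGetD matrice 0 []).length : Int) 1).foldl
    (esARowStep matrice imin imax) m1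

-- loop body: m1[i][jmin], m1[i][jmax] = m1[i][jmax], m1[i][jmin]  (RHS read first)
def esAColStep (jmin jmax : Int) (m1 : List (List Int)) (i : Int) : List (List Int) :=
  PySem.List.pySetD
    (PySem.List.pySetD m1 i
      (PySem.List.pySetD (PySem.List.pyGetD m1 i []) jmin (pvAt m1 i jmax)))
    i
    (PySem.List.pySetD
      (PySem.List.pyGetD
        (PySem.List.pySetD m1 i
          (PySem.List.pySetD (PySem.List.pyGetD m1 i []) jmin (pvAt m1 i jmax)))
        i [])
      jmax (pvAt m1 i jmin))

def esAColSwap (matrice : List (List Int)) (jmin jmax : Int) (m1 : List (List Int)) : List (List Int) :=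
  (PySem.List.pyRange 0 (matrice.length : Int) 1).foldl (esAColStep jmin jmax) m1

def es62 (matrice : List (List Int)) : List (List Int) :=
  esAColSwap matrice (esAMin matrice).2 (esAMax matrice).2
    (esARowSwap matrice (esAMin matrice).1 (esAMax matrice).1 (esACopy matrice))

-- ===== PORT B =====
-- Python tuple '<' on the (value, j, i) triples (all triples here are distinct)
def pvTripLt (s c : Int × Int × Int) : Bool :=
  decide (s.1 < c.1) ||
    (decide (s.1 = c.1) &&
      (decide (s.2.1 < c.2.1) || (decide (s.2.1 = c.2.1) && decide (s.2.2 < c.2.2))))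

-- cells = [(matrice[i][j], j, i) for j in range(m) for i in range(n)]
def esBCells (matrice : List (List Int)) : List (Int × Int × Int) :=
  (PySem.List.pyRange 0 ((PySem.List.pyGetD matrice 0 []).length : Int) 1).flatMap (fun j =>
    (PySem.List.pyRange 0 (matrice.length : Int) 1).map (fun i => (pvAt matrice i j, j, i)))

-- max(cells) / min(cells): builtin max/min of a nonempty tuple list (first extremal among equals;
-- the [] branch is unreachable under Pre_es62)
def esBMax (matrice : List (List Int)) : Int × Int × Int :=
  match esBCells matrice with
  | [] => (0, 0, 0)
  | c :: rest => rest.foldl (fun s c => if pvTripLt s c then c else s) c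

def esBMin (matrice : List (List Int)) : Int × Int × Int :=
  match esBCells matrice with
  | [] => (0, 0, 0)
  | c :: rest => rest.foldl (fun s c => if pvTripLt c s then c else s) c

-- rows[a], rows[b] = rows[b], rows[a]  (both reads before the writes)
def esBSwap (l : List (List Int)) (a b : Int) : List (List Int) :=
  PySem.List.pySetD (PySem.List.pySetD l a (PySem.List.pyGetD l b [])) b
    (PySem.List.pyGetD l a [])

-- [[row[j] for row in rows] for j in range(len(rows[0]))]  (row[j] in range under Pre_es62)
def esBTranspose (rows : List (List Int)) : List (List Int) :=
  (PySem.List.pyRange 0 ((PySem.List.pyGetD rows 0 []).length : Int) 1).map (fun j =>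
    rows.map (fun row => PySem.List.pyGetD row j 0))

def es62_alt (matrice : List (List Int)) : List (List Int) :=
  esBTranspose
    (esBSwap
      (esBTranspose
        (esBSwap
          (matrice.map (fun row =>
            PySem.List.slice row none (some ((PySem.List.pyGetD matrice 0 []).length : Int))))
          (esBMin matrice).2.2 (esBMax matrice).2.2))
      (esBMin matrice).2.1 (esBMax matrice).2.1)

-- ===== PRECONDITION & SPEC =====
-- Exactly where A returns: a nonempty matrix with a nonempty first row and every row at least as
-- long as the first (otherwise `matrice[0]`, a column scan, or the column-swap loop raises IndexError).
def Pre_es62 (matrice : List (List Int)) : Prop :=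
  matrice ≠ [] ∧ 0 < matrice.headI.length ∧ ∀ r ∈ matrice, matrice.headI.length ≤ r.length
instance (matrice : List (List Int)) : Decidable (Pre_es62 matrice) := by unfold Pre_es62; infer_instance

def pvWitness_es62 : List (List Int) := [[1, 2], [3, 4]]

def Spec_es62 (matrice : List (List Int)) (out : List (List Int)) : Prop := out = es62_alt matrice
instance (matrice : List (List Int)) (out : List (List Int)) : Decidable (Spec_es62 matrice out) := by unfold Spec_es62; infer_instance

-- ===== CLAIM (what is proved, stated in full; the proofs are below) =====
def Claim_equal_es62 : Prop := ∀ (matrice : List (List Int)), Dom_es62 matrice → Pre_es62 matrice → Spec_es62 matrice (es62 matrice)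

-- ===== LEMMAS AND PROOFS =====

-- the matrix [[φ i j for j < M] for i < N]
def mkMat (N M : Nat) (φ : Nat → Nat → Int) : List (List Int) :=
  (List.range N).map (fun i => (List.range M).map (φ i))

-- column-major (i, j) cell list, the common index sequence of both programs
def pvCellsP (matrice : List (List Int)) : List (Int × Int) :=
  (PySem.List.pyRange 0 ((PySem.List.pyGetD matrice 0 []).length : Int) 1).flatMap (fun j =>
    (PySem.List.pyRange 0 (matrice.length : Int) 1).map (fun i => (i, j)))

-- strict column-major position order
def pvPosLt (s c : Int × Int) : Prop := s.2 < c.2 ∨ (s.2 = c.2 ∧ s.1 < c.1)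

def pvTrip (matrice : List (List Int)) (c : Int × Int) : Int × Int × Int :=
  (pvAt matrice c.1 c.2, c.2, c.1)

lemma pv_foldl_flatMap {α β σ : Type} (l : List α) (g : α → List β) (f : σ → β → σ) (init : σ) :
    (l.flatMap g).foldl f init = l.foldl (fun s x => (g x).foldl f s) init := by
  induction l generalizing init with
  | nil => rfl
  | cons a t ih => simp [List.foldl_append, ih]

lemma esAMax_fold (matrice : List (List Int)) :
    esAMax matrice = (pvCellsP matrice).foldl
      (fun (s c : Int × Int) => if pvAt matrice s.1 s.2 ≤ pvAt matrice c.1 c.2 then c else s)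
      (0, 0) := by
  unfold esAMax pvCellsP
  rw [pv_foldl_flatMap]
  simp [List.foldl_map]

lemma esAMin_fold (matrice : List (List Int)) :
    esAMin matrice = (pvCellsP matrice).foldl
      (fun (s c : Int × Int) => if pvAt matrice c.1 c.2 < pvAt matrice s.1 s.2 then c else s)
      (0, 0) := by
  unfold esAMin pvCellsP
  rw [pv_foldl_flatMap]
  simp [List.foldl_map]

lemma esBCells_eq_map (matrice : List (List Int)) :
    esBCells matrice = (pvCellsP matrice).map (pvTrip matrice) := by
  unfold esBCells pvCellsP
  simp only [List.map_flatMap, List.map_map]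
  apply List.flatMap_congr
  intro j _
  apply List.map_congr_left
  intro i _
  simp [pvTrip, Function.comp]

lemma pvCellsP_pairwise (matrice : List (List Int)) :
    (pvCellsP matrice).Pairwise pvPosLt := by
  unfold pvCellsP
  rw [List.pairwise_flatMap]
  constructor
  · intro j _
    rw [List.pairwise_map]
    exact (PySem.List.pairwise_lt_pyRange_one 0 _).imp (fun h => Or.inr ⟨rfl, h⟩)
  · apply (PySem.List.pairwise_lt_pyRange_one 0 _).imp
    intro a b hab x hx y hy
    simp only [List.mem_map] at hx hy
    obtain ⟨i1, _, rfl⟩ := hx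
    obtain ⟨i2, _, rfl⟩ := hy
    exact Or.inl hab

lemma pvCellsP_cons (matrice : List (List Int))
    (hN : 0 < (matrice.length : Int)) (hM : 0 < ((PySem.List.pyGetD matrice 0 []).length : Int)) :
    ∃ l', pvCellsP matrice = ((0 : Int), (0 : Int)) :: l' := by
  unfold pvCellsP
  rw [PySem.List.pyRange_one_cons hM, List.flatMap_cons, PySem.List.pyRange_one_cons hN,
    List.map_cons, List.cons_append]
  exact ⟨_, rfl⟩

lemma pvPosLt_asymm {s c : Int × Int} (h : pvPosLt s c) : ¬ pvPosLt c s := by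
  unfold pvPosLt at *
  omega

lemma pv_sim_max (matrice : List (List Int)) :
    ∀ (l : List (Int × Int)) (s : Int × Int), (∀ c ∈ l, pvPosLt s c) → l.Pairwise pvPosLt →
      (l.map (pvTrip matrice)).foldl (fun s c => if pvTripLt s c then c else s) (pvTrip matrice s)
      = pvTrip matrice (l.foldl
          (fun (s c : Int × Int) => if pvAt matrice s.1 s.2 ≤ pvAt matrice c.1 c.2 then c else s) s) := by
  intro l
  induction l with
  | nil => intro s _ _; rfl
  | cons a t ih =>
    intro s hall hp
    have hsa : pvPosLt s a := hall a (by simp)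
    have hstep : (if pvTripLt (pvTrip matrice s) (pvTrip matrice a) then pvTrip matrice a else pvTrip matrice s)
        = pvTrip matrice (if pvAt matrice s.1 s.2 ≤ pvAt matrice a.1 a.2 then a else s) := by
      by_cases hv : pvAt matrice s.1 s.2 ≤ pvAt matrice a.1 a.2
      · have : pvTripLt (pvTrip matrice s) (pvTrip matrice a) = true := by
          rcases lt_or_eq_of_le hv with hlt | heq
          · simp [pvTripLt, pvTrip, hlt]
          · unfold pvPosLt at hsa
            simp only [pvTripLt, pvTrip, heq]
            rcases hsa with h1 | ⟨h1, h2⟩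
            · simp [h1]
            · simp [h1, h2]
        simp [this, hv]
      · have : pvTripLt (pvTrip matrice s) (pvTrip matrice a) = false := by
          simp only [pvTripLt, pvTrip]
          push_neg at hv
          simp [not_lt_of_gt hv, ne_of_gt hv]
        simp [this, hv]
    simp only [List.map_cons, List.foldl_cons, hstep]
    have hnext : ∀ c ∈ t, pvPosLt (if pvAt matrice s.1 s.2 ≤ pvAt matrice a.1 a.2 then a else s) c := by
      intro c hc
      split
      · exact List.rel_of_pairwise_cons hp hc
      · exact hall c (by simp [hc])
    exact ih _ hnext hp.of_cons

lemma pv_sim_min (matrice : List (List Int)) :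
    ∀ (l : List (Int × Int)) (s : Int × Int), (∀ c ∈ l, pvPosLt s c) → l.Pairwise pvPosLt →
      (l.map (pvTrip matrice)).foldl (fun s c => if pvTripLt c s then c else s) (pvTrip matrice s)
      = pvTrip matrice (l.foldl
          (fun (s c : Int × Int) => if pvAt matrice c.1 c.2 < pvAt matrice s.1 s.2 then c else s) s) := by
  intro l
  induction l with
  | nil => intro s _ _; rfl
  | cons a t ih =>
    intro s hall hp
    have hsa : pvPosLt s a := hall a (by simp)
    have hstep : (if pvTripLt (pvTrip matrice a) (pvTrip matrice s) then pvTrip matrice a else pvTrip matrice s)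
        = pvTrip matrice (if pvAt matrice a.1 a.2 < pvAt matrice s.1 s.2 then a else s) := by
      by_cases hv : pvAt matrice a.1 a.2 < pvAt matrice s.1 s.2
      · have : pvTripLt (pvTrip matrice a) (pvTrip matrice s) = true := by
          simp [pvTripLt, pvTrip, hv]
        simp [this, hv]
      · have : pvTripLt (pvTrip matrice a) (pvTrip matrice s) = false := by
          have hno := pvPosLt_asymm hsa
          unfold pvPosLt at hno
          push_neg at hv hno
          simp only [pvTripLt, pvTrip]
          rcases lt_or_eq_of_le hv with hlt | heq
          · simp [not_lt_of_gt hlt, ne_of_gt hlt]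
          · simp only [heq, lt_irrefl, decide_false, decide_true, Bool.false_or, Bool.true_and]
            rcases lt_or_eq_of_le (hno.1) with h1 | h1
            · simp [not_lt_of_gt h1, ne_of_gt h1]
            · simp [h1, not_lt_of_ge (hno.2 h1.symm)]
        simp [this, hv]
    simp only [List.map_cons, List.foldl_cons, hstep]
    have hnext : ∀ c ∈ t, pvPosLt (if pvAt matrice a.1 a.2 < pvAt matrice s.1 s.2 then a else s) c := by
      intro c hc
      split
      · exact List.rel_of_pairwise_cons hp hc
      · exact hall c (by simp [hc])
    exact ih _ hnext hp.of_cons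

lemma esBMax_eq (matrice : List (List Int))
    (hN : 0 < (matrice.length : Int)) (hM : 0 < ((PySem.List.pyGetD matrice 0 []).length : Int)) :
    esBMax matrice = pvTrip matrice (esAMax matrice) := by
  obtain ⟨l', hl⟩ := pvCellsP_cons matrice hN hM
  have hp : (pvCellsP matrice).Pairwise pvPosLt := pvCellsP_pairwise matrice
  rw [hl] at hp
  unfold esBMax
  rw [esBCells_eq_map, hl, List.map_cons]
  rw [esAMax_fold, hl, List.foldl_cons]
  simp only [if_pos (le_refl (pvAt matrice 0 0))]
  exact pv_sim_max matrice l' (0, 0) (fun c hc => List.rel_of_pairwise_cons hp hc) hp.of_cons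

lemma esBMin_eq (matrice : List (List Int))
    (hN : 0 < (matrice.length : Int)) (hM : 0 < ((PySem.List.pyGetD matrice 0 []).length : Int)) :
    esBMin matrice = pvTrip matrice (esAMin matrice) := by
  obtain ⟨l', hl⟩ := pvCellsP_cons matrice hN hM
  have hp : (pvCellsP matrice).Pairwise pvPosLt := pvCellsP_pairwise matrice
  rw [hl] at hp
  unfold esBMin
  rw [esBCells_eq_map, hl, List.map_cons]
  rw [esAMin_fold, hl, List.foldl_cons]
  simp only [lt_irrefl, if_neg (lt_irrefl (pvAt matrice 0 0)), if_false]
  exact pv_sim_min matrice l' (0, 0) (fun c hc => List.rel_of_pairwise_cons hp hc) hp.of_cons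

lemma pv_foldl_inv {σ α : Type} (P : σ → Prop) (f : σ → α → σ) (l : List α) (init : σ)
    (h0 : P init) (hstep : ∀ s x, x ∈ l → P s → P (f s x)) : P (l.foldl f init) := by
  induction l generalizing init with
  | nil => exact h0
  | cons a t ih =>
    exact ih _ (hstep _ _ (by simp) h0) (fun s x hx hs => hstep s x (by simp [hx]) hs)

lemma cells_fold_bounds (matrice : List (List Int))
    (hN : 0 < matrice.length) (hM : 0 < (PySem.List.pyGetD matrice 0 []).length)
    (f : Int × Int → Int × Int → Int × Int)
    (hf : ∀ s c, f s c = s ∨ f s c = c) :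
    0 ≤ ((pvCellsP matrice).foldl f (0, 0)).1 ∧
      ((pvCellsP matrice).foldl f (0, 0)).1 < (matrice.length : Int) ∧
      0 ≤ ((pvCellsP matrice).foldl f (0, 0)).2 ∧
      ((pvCellsP matrice).foldl f (0, 0)).2 < ((PySem.List.pyGetD matrice 0 []).length : Int) := by
  apply pv_foldl_inv (P := fun s : Int × Int =>
    0 ≤ s.1 ∧ s.1 < (matrice.length : Int) ∧ 0 ≤ s.2 ∧ s.2 < ((PySem.List.pyGetD matrice 0 []).length : Int))
  · refine ⟨le_refl 0, ?_, le_refl 0, ?_⟩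
    · show (0 : Int) < _; exact_mod_cast hN
    · show (0 : Int) < _; exact_mod_cast hM
  · intro s c hc hs
    rcases hf s c with h | h
    · rw [h]; exact hs
    · rw [h]
      unfold pvCellsP at hc
      simp only [List.mem_flatMap, List.mem_map] at hc
      obtain ⟨j, hj, i, hi, rfl⟩ := hc
      rw [PySem.List.mem_pyRange_one] at hj hi
      exact ⟨hi.1, hi.2, hj.1, hj.2⟩

lemma set_map_range {α : Type} (N k : Nat) (f : Nat → α) (v : α) :
    ((List.range N).map f).set k v = (List.range N).map (fun i => if i = k then v else f i) := by
  apply List.ext_getElem (by simp)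
  intro i h1 h2
  simp only [List.getElem_set, List.getElem_map, List.getElem_range]
  rcases eq_or_ne k i with h | h
  · subst h; simp
  · simp [h, Ne.symm h]

lemma mkMat_row (N M : Nat) (φ : Nat → Nat → Int) (r : Nat) (hr : r < N) :
    PySem.List.pyGetD (mkMat N M φ) (↑r) [] = (List.range M).map (φ r) := by
  simp [mkMat, List.getD_eq_getElem?_getD, hr]

lemma mkMat_at (N M : Nat) (φ : Nat → Nat → Int) (i j : Nat) (hi : i < N) (hj : j < M) :
    pvAt (mkMat N M φ) (↑i) (↑j) = φ i j := by
  unfold pvAt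
  rw [mkMat_row N M φ i hi]
  simp [List.getD_eq_getElem?_getD, hj]

lemma mkMat_set (N M : Nat) (φ : Nat → Nat → Int) (r c : Nat) (hr : r < N) (v : Int) :
    PySem.List.pySetD (mkMat N M φ) (↑r)
      (PySem.List.pySetD (PySem.List.pyGetD (mkMat N M φ) (↑r) []) (↑c) v)
    = mkMat N M (fun i j => if i = r ∧ j = c then v else φ i j) := by
  rw [mkMat_row N M φ r hr]
  simp only [PySem.List.pySetD_natCast]
  rw [set_map_range]
  show ((List.range N).map (fun i => (List.range M).map (φ i))).set r _ = _
  rw [set_map_range]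
  unfold mkMat
  apply List.map_congr_left
  intro i hi
  rcases eq_or_ne i r with h | h
  · subst h
    rw [if_pos rfl]
    apply List.map_congr_left
    intro j hj
    rcases eq_or_ne j c with h2 | h2 <;> simp [h2]
  · simp only [if_neg h]
    apply List.map_congr_left
    intro j hj
    simp [h]

lemma mkMat_congr (N M : Nat) (φ ψ : Nat → Nat → Int)
    (h : ∀ i < N, ∀ j < M, φ i j = ψ i j) : mkMat N M φ = mkMat N M ψ := by
  unfold mkMat
  apply List.map_congr_left
  intro i hi
  apply List.map_congr_left
  intro j hj
  simp only [List.mem_range] at hi hj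
  exact h i hi j hj

lemma rowstep_mk (matrice : List (List Int)) (N M : Nat) (φ : Nat → Nat → Int)
    (u p c : Nat) (hu : u < N) (hp : p < N) :
    esARowStep matrice (↑u) (↑p) (mkMat N M φ) (↑c)
    = mkMat N M (fun i j =>
        if i = p ∧ j = c then pvAt matrice (↑u) (↑c)
        else if i = u ∧ j = c then pvAt matrice (↑p) (↑c)
        else φ i j) := by
  unfold esARowStep
  rw [mkMat_set N M φ u c hu]
  rw [mkMat_set N M _ p c hp]

lemma colstep_mk (N M : Nat) (φ : Nat → Nat → Int)
    (v q k : Nat) (hk : k < N) (hv : v < M) (hq : q < M) :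
    esAColStep (↑v) (↑q) (mkMat N M φ) (↑k)
    = mkMat N M (fun i j =>
        if i = k ∧ j = q then φ k v
        else if i = k ∧ j = v then φ k q
        else φ i j) := by
  unfold esAColStep
  rw [mkMat_at N M φ k q hk hq, mkMat_at N M φ k v hk hv]
  rw [mkMat_set N M φ k v hk]
  rw [mkMat_set N M _ k q hk]

lemma rowswap_aux (matrice : List (List Int)) (N M : Nat) (u p : Nat) (hu : u < N) (hp : p < N)
    (φ : Nat → Nat → Int) (k : Nat) :
    (List.range k).foldl (fun m1 (jn : Nat) => esARowStep matrice (↑u) (↑p) m1 (↑jn)) (mkMat N M φ)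
    = mkMat N M (fun i j =>
        if j < k then
          (if i = u then pvAt matrice (↑p) (↑j) else if i = p then pvAt matrice (↑u) (↑j) else φ i j)
        else φ i j) := by
  induction k with
  | zero =>
    simp only [List.range_zero, List.foldl_nil]
    apply mkMat_congr; intro i _ j _; simp
  | succ k ih =>
    rw [List.range_succ, List.foldl_append, ih]
    simp only [List.foldl_cons, List.foldl_nil]
    rw [rowstep_mk matrice N M _ u p k hu hp]
    apply mkMat_congr
    intro i hi j hj
    rcases eq_or_ne j k with hjk | hjk
    · subst hjk
      simp only [and_true, lt_irrefl, if_false, Nat.lt_succ_self, if_true]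
      rcases eq_or_ne i u with hiu | hiu
      · subst hiu
        rcases eq_or_ne i p with hip | hip
        · simp [hip]
        · simp [hip]
      · rcases eq_or_ne i p with hip | hip
        · subst hip; simp [hiu]
        · simp [hiu, hip]
    · have h1 : ¬(i = p ∧ j = k) := by intro h; exact hjk h.2
      have h2 : ¬(i = u ∧ j = k) := by intro h; exact hjk h.2
      rcases Nat.lt_or_ge j k with hlt | hge
      · simp [h1, h2, hlt, Nat.lt_succ_of_lt hlt]
      · have hg1 : ¬ j < k := Nat.not_lt.mpr hge
        have hg2 : ¬ j < k + 1 := by omega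
        simp [h1, h2, hg1, hg2]

lemma colswap_aux (N M : Nat) (v q : Nat) (hv : v < M) (hq : q < M)
    (φ : Nat → Nat → Int) (k : Nat) (hk : k ≤ N) :
    (List.range k).foldl (fun m1 (ik : Nat) => esAColStep (↑v) (↑q) m1 (↑ik)) (mkMat N M φ)
    = mkMat N M (fun i j =>
        if i < k then φ i (if j = v then q else if j = q then v else j) else φ i j) := by
  induction k with
  | zero =>
    simp only [List.range_zero, List.foldl_nil]
    apply mkMat_congr; intro i _ j _; simp
  | succ k ih =>
    rw [List.range_succ, List.foldl_append, ih (by omega)]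
    simp only [List.foldl_cons, List.foldl_nil]
    rw [colstep_mk N M _ v q k (by omega) hv hq]
    apply mkMat_congr
    intro i hi j hj
    rcases eq_or_ne i k with hik | hik
    · subst hik
      simp only [true_and, lt_irrefl, if_false, Nat.lt_succ_self, if_true]
      rcases eq_or_ne j q with hjq | hjq
      · subst hjq
        rcases eq_or_ne j v with hjv | hjv
        · simp [hjv]
        · simp [hjv]
      · rcases eq_or_ne j v with hjv | hjv
        · subst hjv; simp [hjq]
        · simp [hjq, hjv]
    · have h1 : ¬(i = k ∧ j = q) := by intro h; exact hik h.1
      have h2 : ¬(i = k ∧ j = v) := by intro h; exact hik h.1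
      rcases Nat.lt_or_ge i k with hlt | hge
      · simp [h1, h2, hlt, Nat.lt_succ_of_lt hlt]
      · have hn1 : ¬ i < k := Nat.not_lt.mpr hge
        have hn2 : ¬ i < k + 1 := by omega
        simp [h1, h2, hn1, hn2]

lemma rowswap_mk (matrice : List (List Int)) (N M : Nat)
    (hM : (PySem.List.pyGetD matrice 0 []).length = M)
    (u p : Nat) (hu : u < N) (hp : p < N) (φ : Nat → Nat → Int) :
    esARowSwap matrice (↑u) (↑p) (mkMat N M φ)
    = mkMat N M (fun i j =>
        if i = u then pvAt matrice (↑p) (↑j) else if i = p then pvAt matrice (↑u) (↑j) else φ i j) := by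
  unfold esARowSwap
  rw [hM, PySem.List.pyRange_zero_natCast, List.foldl_map]
  rw [rowswap_aux matrice N M u p hu hp φ M]
  apply mkMat_congr
  intro i hi j hj
  simp [hj]

lemma colswap_mk (matrice : List (List Int)) (N M : Nat)
    (hN : matrice.length = N)
    (v q : Nat) (hv : v < M) (hq : q < M) (φ : Nat → Nat → Int) :
    esAColSwap matrice (↑v) (↑q) (mkMat N M φ)
    = mkMat N M (fun i j => φ i (if j = v then q else if j = q then v else j)) := by
  unfold esAColSwap
  rw [hN, PySem.List.pyRange_zero_natCast, List.foldl_map]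
  rw [colswap_aux N M v q hv hq φ N (le_refl N)]
  apply mkMat_congr
  intro i hi j hj
  simp [hi]

lemma copy_mk (matrice : List (List Int)) (N M : Nat)
    (hN : matrice.length = N) (hM : (PySem.List.pyGetD matrice 0 []).length = M) :
    esACopy matrice = mkMat N M (fun i j => pvAt matrice (↑i) (↑j)) := by
  unfold esACopy mkMat
  rw [hN, hM, PySem.List.pyRange_zero_natCast, PySem.List.pyRange_zero_natCast]
  simp [List.map_map, Function.comp]

lemma trim_mk (matrice : List (List Int)) (N M : Nat)
    (hN : matrice.length = N) (hM : (PySem.List.pyGetD matrice 0 []).length = M)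
    (hrows : ∀ r ∈ matrice, M ≤ r.length) :
    matrice.map (fun row =>
      PySem.List.slice row none (some ((PySem.List.pyGetD matrice 0 []).length : Int)))
    = mkMat N M (fun i j => pvAt matrice (↑i) (↑j)) := by
  rw [hM]
  apply List.ext_getElem (by simp [mkMat, hN])
  intro i h1 h2
  have hiN : i < matrice.length := by simpa using h1
  simp only [List.getElem_map, PySem.List.slice_to_natCast, mkMat, List.getElem_range]
  have hlen : M ≤ (matrice[i]'hiN).length := hrows _ (List.getElem_mem hiN)
  apply List.ext_getElem (by simp [Nat.min_eq_left hlen])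
  intro j hj1 hj2
  simp only [List.getElem_take, List.getElem_map, List.getElem_range]
  have hjM : j < M := by simpa [Nat.min_eq_left hlen] using hj1
  unfold pvAt
  have hj' : j < (matrice[i]'hiN).length := by omega
  rw [PySem.List.pyGetD_natCast, PySem.List.pyGetD_natCast,
    List.getD_eq_getElem _ _ hiN, List.getD_eq_getElem _ _ hj']

lemma swap_mk (N M : Nat) (φ : Nat → Nat → Int) (u p : Nat) (hu : u < N) (hp : p < N) :
    esBSwap (mkMat N M φ) (↑u) (↑p)
    = mkMat N M (fun i j => φ (if i = p then u else if i = u then p else i) j) := by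
  unfold esBSwap
  rw [mkMat_row N M φ u hu, mkMat_row N M φ p hp]
  simp only [PySem.List.pySetD_natCast]
  unfold mkMat
  rw [set_map_range, set_map_range]
  apply List.map_congr_left
  intro i _
  rcases eq_or_ne i p with hip | hip
  · subst hip
    rcases eq_or_ne i u with hiu | hiu
    · simp [hiu]
    · simp [hiu]
  · rcases eq_or_ne i u with hiu | hiu
    · subst hiu; simp [hip]
    · simp [hip, hiu]

lemma transpose_mk (N M : Nat) (φ : Nat → Nat → Int) (hN : 0 < N) :
    esBTranspose (mkMat N M φ) = mkMat M N (fun j i => φ i j) := by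
  unfold esBTranspose
  have h0 : PySem.List.pyGetD (mkMat N M φ) 0 [] = (List.range M).map (φ 0) := by
    have := mkMat_row N M φ 0 hN
    simpa using this
  rw [h0]
  simp only [List.length_map, List.length_range]
  rw [PySem.List.pyRange_zero_natCast]
  unfold mkMat
  rw [List.map_map]
  apply List.map_congr_left
  intro j hj
  simp only [List.mem_range] at hj
  simp only [Function.comp, List.map_map]
  apply List.map_congr_left
  intro i _
  simp only [Function.comp]
  rw [PySem.List.pyGetD_natCast]
  exact PySem.List.getD_map_range (φ i) M j 0 hj

-- ===== VERDICT (by name: the statement is the Claim_ definition above) =====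
set_option maxHeartbeats 2000000 in
theorem es62_spec : Claim_equal_es62 := by
  intro matrice _ hpre
  obtain ⟨hne, hm0, hrows⟩ := hpre
  unfold Spec_es62
  have hN0 : 0 < matrice.length := List.length_pos_iff.mpr hne
  have hM0 : 0 < (PySem.List.pyGetD matrice 0 []).length := by
    cases matrice with
    | nil => exact absurd rfl hne
    | cons h t => simpa [PySem.List.pyGetD_zero] using hm0
  have hrows' : ∀ r ∈ matrice, (PySem.List.pyGetD matrice 0 []).length ≤ r.length := by
    cases matrice with
    | nil => exact absurd rfl hne
    | cons h t =>
      intro r hr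
      have := hrows r hr
      simpa [PySem.List.pyGetD_zero] using this
  set N := matrice.length with hN
  set M := (PySem.List.pyGetD matrice 0 []).length with hM
  -- bounds of the two extremal positions
  have hmaxb := cells_fold_bounds matrice hN0 hM0
      (fun s c => if pvAt matrice s.1 s.2 ≤ pvAt matrice c.1 c.2 then c else s)
      (by intro s c; by_cases h : pvAt matrice s.1 s.2 ≤ pvAt matrice c.1 c.2 <;> simp [h])
  have hminb := cells_fold_bounds matrice hN0 hM0
      (fun s c => if pvAt matrice c.1 c.2 < pvAt matrice s.1 s.2 then c else s)
      (by intro s c; by_cases h : pvAt matrice c.1 c.2 < pvAt matrice s.1 s.2 <;> simp [h])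
  rw [← esAMax_fold] at hmaxb
  rw [← esAMin_fold] at hminb
  obtain ⟨hp0, hpN, hq0, hqM⟩ := hmaxb
  obtain ⟨hu0, huN, hv0, hvM⟩ := hminb
  set p := (esAMax matrice).1.toNat with hpdef
  set q := (esAMax matrice).2.toNat with hqdef
  set u := (esAMin matrice).1.toNat with hudef
  set v := (esAMin matrice).2.toNat with hvdef
  have hp1 : (esAMax matrice).1 = (↑p : Int) := (Int.toNat_of_nonneg hp0).symm
  have hq1 : (esAMax matrice).2 = (↑q : Int) := (Int.toNat_of_nonneg hq0).symm
  have hu1 : (esAMin matrice).1 = (↑u : Int) := (Int.toNat_of_nonneg hu0).symm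
  have hv1 : (esAMin matrice).2 = (↑v : Int) := (Int.toNat_of_nonneg hv0).symm
  have hpN' : p < N := by rw [hp1] at hpN; exact_mod_cast hpN
  have huN' : u < N := by rw [hu1] at huN; exact_mod_cast huN
  have hqM' : q < M := by rw [hq1] at hqM; exact_mod_cast hqM
  have hvM' : v < M := by rw [hv1] at hvM; exact_mod_cast hvM
  -- A's pipeline in closed form
  unfold es62
  rw [hp1, hq1, hu1, hv1]
  rw [copy_mk matrice N M rfl rfl]
  rw [rowswap_mk matrice N M rfl u p huN' hpN' _]
  rw [colswap_mk matrice N M rfl v q hvM' hqM' _]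
  -- B's pipeline in closed form
  unfold es62_alt
  have hmx : esBMax matrice = pvTrip matrice (esAMax matrice) :=
    esBMax_eq matrice (by exact_mod_cast hN0) (by exact_mod_cast hM0)
  have hmn : esBMin matrice = pvTrip matrice (esAMin matrice) :=
    esBMin_eq matrice (by exact_mod_cast hN0) (by exact_mod_cast hM0)
  rw [hmx, hmn]
  simp only [pvTrip]
  rw [hp1, hq1, hu1, hv1]
  rw [trim_mk matrice N M rfl rfl hrows']
  rw [swap_mk N M _ u p huN' hpN']
  rw [transpose_mk N M _ hN0]
  rw [swap_mk M N _ v q hvM' hqM']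
  rw [transpose_mk M N _ hM0]
  -- pointwise comparison of the two closed forms
  apply mkMat_congr
  intro i _ j _
  split_ifs <;> first
    | rfl
    | omega
    | (congr 1 <;> omega)
    | (congr 2 <;> omega)
    | (congr 1; · congr 1 <;> omega
       · omega)
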